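-- pv_equiv track=rewrite | github.com/shiran-valansi/Iteresting-Questions | cycle_letters_0X_solution.py | cycle_letters
-- ===== SOURCE A (Python) =====
-- def cycle_letters(s):
--     """
--     input: string of words
--     output: new string of words with rotated letters
--     >>> cycle_letters('who welld horly')
--     'why hello world'
--
--     >>> cycle_letters('bes le uoogit')
--     'let us boogie'
--
--     """
--
--     # I assume the string is not an empty string
--     # for one word strings- it will just return the same word
--
--     words = s.split()
--     n = len(words)
--     new_words = []
--     for i,word in enumerate(words):
--         first_letter = get_first_letter(words,i,n)
--         last_letter = get_last_letter(words,i,n)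
--         new_words.append(build_word(first_letter, word, last_letter))
--
--     new_words_str = words_to_string(new_words)
--     return new_words_str
--
-- def get_first_letter(words,i,n):
--     """returns first letter of new word"""
--     # calculate which word we take the first letter from
--     # return that letter from that word
--     first_letter_index = (i + 1) % n
--     first_letter = words[first_letter_index][0]
--     return first_letter
--
-- def get_last_letter(words,i,n):
--     """returns last letter of new word"""
--     # calculate which word we take the last letter from
--     # return that letter from that word
--     last_letter_index = (i - 1 + n) % n
--     last_letter = words[last_letter_index][-1]
--     return last_letter
--
-- def build_word(first_letter, word, last_letter):
--     """return new word according to new first and last letters """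
--     new_word = first_letter + word[1:-1] + last_letter
--     return new_word
--
-- def words_to_string(words):
--     """return a string made of list of words """
--     return " ".join(words)
-- ===== SOURCE B (Python) =====
-- def cycle_letters(s):
--     """Bubble-rotation rewrite: split each word into a mutable
--     [first, middle, last] triple, then realize the cyclic shifts purely by
--     in-place adjacent swaps (one forward pass bubbles the first letters left,
--     one backward pass bubbles the last letters right); no index arithmetic."""
--     trips = [[w[0], w[1:-1], w[-1]] for w in s.split()]
--     for i in range(len(trips) - 1):
--         trips[i][0], trips[i + 1][0] = trips[i + 1][0], trips[i][0]
--     for i in range(len(trips) - 1, 0, -1):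
--         trips[i][2], trips[i - 1][2] = trips[i - 1][2], trips[i][2]
--     return " ".join(f + m + l for f, m, l in trips)
-- ===== Notes on version B (the rewrite author's own statement) =====
-- stated objective: alternative
-- what changed: Replaces the per-word modular-index lookups with two in-place adjacent-transposition (bubble) passes over a list of (first, middle, last) triples: a forward pass of neighbour swaps rotates the first letters left and a backward pass rotates the last letters right, with no index arithmetic or list rotation.
import Mathlib
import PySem

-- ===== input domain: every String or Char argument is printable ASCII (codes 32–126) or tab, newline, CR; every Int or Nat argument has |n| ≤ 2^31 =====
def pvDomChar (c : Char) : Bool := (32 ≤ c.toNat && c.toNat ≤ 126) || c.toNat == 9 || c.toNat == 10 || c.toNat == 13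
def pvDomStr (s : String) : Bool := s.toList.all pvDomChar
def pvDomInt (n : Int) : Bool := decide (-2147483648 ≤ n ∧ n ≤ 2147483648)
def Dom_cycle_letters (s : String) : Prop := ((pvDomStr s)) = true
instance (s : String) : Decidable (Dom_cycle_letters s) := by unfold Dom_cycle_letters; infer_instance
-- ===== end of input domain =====

-- B replaces A's per-word modular-index lookups by two in-place adjacent-swap (bubble) passes over (first, middle, last) triples — an alternative decomposition, same cost.


-- ===== PORT A =====
-- words[(i+1) % n][0]; both indices are always in range when the loop body runs
-- (n > 0 and split₀ yields nonempty words), so the pyGetD defaults are never used.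
def pvGetFirstLetter (words : List (List Char)) (i n : Int) : Char :=
  let first_letter_index := PySem.Int.mod (i + 1) n
  PySem.List.pyGetD (PySem.List.pyGetD words first_letter_index []) 0 ' '

def pvGetLastLetter (words : List (List Char)) (i n : Int) : Char :=
  let last_letter_index := PySem.Int.mod (i - 1 + n) n
  PySem.List.pyGetD (PySem.List.pyGetD words last_letter_index []) (-1) ' '

def pvBuildWord (first_letter : Char) (word : List Char) (last_letter : Char) : List Char :=
  [first_letter] ++ PySem.List.slice word (some 1) (some (-1)) ++ [last_letter]

def pvWordsToString (words : List (List Char)) : List Char :=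
  PySem.Chars.join [' '] words

def cycle_letters (s : String) : String :=
  let words := PySem.Chars.split₀ s.toList
  let n : Int := PySem.List.len words
  let new_words := (PySem.List.enumerate words).foldl
    (fun acc p => acc ++ [pvBuildWord (pvGetFirstLetter words p.1 n) p.2 (pvGetLastLetter words p.1 n)]) []
  String.ofList (pvWordsToString new_words)

-- ===== PORT B =====
-- trips[i][0], trips[i+1][0] = trips[i+1][0], trips[i][0]  (simultaneous assignment:
-- both reads happen before both writes; indices from range are in range, so the
-- pyGetD defaults are never used)
def pvSwapFirst (t : List (Char × List Char × Char)) (i j : Int) : List (Char × List Char × Char) :=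
  let x := PySem.List.pyGetD t i (' ', [], ' ')
  let y := PySem.List.pyGetD t j (' ', [], ' ')
  PySem.List.pySetD (PySem.List.pySetD t i (y.1, x.2)) j (x.1, y.2)

-- trips[i][2], trips[i-1][2] = trips[i-1][2], trips[i][2]
def pvSwapLast (t : List (Char × List Char × Char)) (i j : Int) : List (Char × List Char × Char) :=
  let x := PySem.List.pyGetD t i (' ', [], ' ')
  let y := PySem.List.pyGetD t j (' ', [], ' ')
  PySem.List.pySetD (PySem.List.pySetD t i (x.1, x.2.1, y.2.2)) j (y.1, y.2.1, x.2.2)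

def cycle_letters_alt (s : String) : String :=
  let trips := (PySem.Chars.split₀ s.toList).map (fun w =>
    (PySem.List.pyGetD w 0 ' ', PySem.List.slice w (some 1) (some (-1)), PySem.List.pyGetD w (-1) ' '))
  let trips := (PySem.List.pyRange 0 (PySem.List.len trips - 1) 1).foldl
    (fun t i => pvSwapFirst t i (i + 1)) trips
  let trips := (PySem.List.pyRange (PySem.List.len trips - 1) 0 (-1)).foldl
    (fun t i => pvSwapLast t i (i - 1)) trips
  String.ofList (PySem.Chars.join [' '] (trips.map (fun p => [p.1] ++ p.2.1 ++ [p.2.2])))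

-- ===== PRECONDITION & SPEC =====
def Spec_cycle_letters (s : String) (out : String) : Prop := out = cycle_letters_alt s
instance (s : String) (out : String) : Decidable (Spec_cycle_letters s out) := by unfold Spec_cycle_letters; infer_instance

-- ===== CLAIM (what is proved, stated in full; the proofs are below) =====
def Claim_equal_cycle_letters : Prop := ∀ (s : String), Dom_cycle_letters s → Spec_cycle_letters s (cycle_letters s)

-- ===== LEMMAS AND PROOFS =====

-- proof-side Nat-indexed forms of the two swap steps
def pvD : Char × List Char × Char := (' ', [], ' ')

def pvSwapFN (t : List (Char × List Char × Char)) (k : Nat) : List (Char × List Char × Char) :=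
  let x := t.getD k pvD
  let y := t.getD (k + 1) pvD
  (t.set k (y.1, x.2)).set (k + 1) (x.1, y.2)

def pvSwapLN (t : List (Char × List Char × Char)) (k : Nat) : List (Char × List Char × Char) :=
  let x := t.getD k pvD
  let y := t.getD (k - 1) pvD
  (t.set k (x.1, x.2.1, y.2.2)).set (k - 1) (y.1, y.2.1, x.2.2)

def pvFpass (l : List (Char × List Char × Char)) : List (Char × List Char × Char) :=
  (List.range (l.length - 1)).foldl pvSwapFN l

def pvBpass (l : List (Char × List Char × Char)) : List (Char × List Char × Char) :=
  ((List.range (l.length - 1)).map (fun k => l.length - 1 - k)).foldl pvSwapLN l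

-- B's forward pyRange foldl is pvFpass
theorem pv_fwd_bridge (l : List (Char × List Char × Char)) :
    (PySem.List.pyRange 0 (PySem.List.len l - 1) 1).foldl (fun t i => pvSwapFirst t i (i + 1)) l
      = pvFpass l := by
  rw [PySem.List.len_eq, PySem.List.pyRange_one, List.foldl_map,
    show (((l.length : Int) - 1) - 0).toNat = l.length - 1 by omega]
  unfold pvFpass
  apply PySem.List.foldl_congr_mem
  intro t k _
  simp only [pvSwapFirst, pvSwapFN, pvD, zero_add, ← Nat.cast_add_one,
    PySem.List.pyGetD_natCast, PySem.List.pySetD_natCast]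

-- B's backward pyRange foldl is pvBpass
theorem pv_bwd_bridge (l : List (Char × List Char × Char)) :
    (PySem.List.pyRange (PySem.List.len l - 1) 0 (-1)).foldl (fun t i => pvSwapLast t i (i - 1)) l
      = pvBpass l := by
  rw [PySem.List.len_eq, PySem.List.pyRange_neg_one, List.foldl_map,
    show (((l.length : Int) - 1) - 0).toNat = l.length - 1 by omega]
  unfold pvBpass
  rw [List.foldl_map]
  apply PySem.List.foldl_congr_mem
  intro t k hk
  have hklt : k < l.length - 1 := List.mem_range.mp hk
  have e1 : (l.length : Int) - 1 - (k : Int) = ((l.length - 1 - k : Nat) : Int) := by omega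
  have e2 : ((l.length - 1 - k : Nat) : Int) - 1 = ((l.length - 1 - k - 1 : Nat) : Int) := by omega
  simp only [pvSwapLast, pvSwapLN, pvD, e1, e2,
    PySem.List.pyGetD_natCast, PySem.List.pySetD_natCast]

-- shift lemmas: a swap at positive index leaves the head alone
theorem pv_swapFN_cons (x : Char × List Char × Char) (ys : List (Char × List Char × Char)) (k : Nat) :
    pvSwapFN (x :: ys) (k + 1) = x :: pvSwapFN ys k := by
  simp [pvSwapFN]

theorem pv_swapLN_cons (x : Char × List Char × Char) (ys : List (Char × List Char × Char))
    (k : Nat) :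
    pvSwapLN (x :: ys) (k + 2) = x :: pvSwapLN ys (k + 1) := by
  simp [pvSwapLN]

theorem pv_foldl_swapFN_map_succ (r : List Nat) (x : Char × List Char × Char)
    (ys : List (Char × List Char × Char)) :
    List.foldl pvSwapFN (x :: ys) (r.map Nat.succ) = x :: List.foldl pvSwapFN ys r := by
  induction r generalizing ys with
  | nil => simp
  | cons k r ih =>
    simp only [List.map_cons, List.foldl_cons]
    rw [show Nat.succ k = k + 1 from rfl, pv_swapFN_cons, ih]

theorem pv_foldl_swapLN_map_succ (r : List Nat) (hr : ∀ k ∈ r, 1 ≤ k)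
    (x : Char × List Char × Char) (ys : List (Char × List Char × Char)) :
    List.foldl pvSwapLN (x :: ys) (r.map Nat.succ) = x :: List.foldl pvSwapLN ys r := by
  induction r generalizing ys with
  | nil => simp
  | cons k r ih =>
    obtain ⟨m, rfl⟩ := Nat.exists_eq_add_of_le (hr k (by simp))
    simp only [List.map_cons, List.foldl_cons]
    rw [show Nat.succ (1 + m) = m + 2 by omega, show 1 + m = m + 1 by omega, pv_swapLN_cons,
      ih (fun k hk => hr k (by simp [hk]))]

-- the forward pass peels off: swap (0,1), then the same pass one position right
theorem pv_fpass_cons₂ (a b : Char × List Char × Char) (t : List (Char × List Char × Char)) :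
    pvFpass (a :: b :: t) = (b.1, a.2) :: pvFpass ((a.1, b.2) :: t) := by
  unfold pvFpass
  simp only [List.length_cons, Nat.add_sub_cancel]
  rw [List.range_succ_eq_map, List.foldl_cons,
    show pvSwapFN (a :: b :: t) 0 = (b.1, a.2) :: (a.1, b.2) :: t by simp [pvSwapFN],
    pv_foldl_swapFN_map_succ]

-- the backward pass peels off: the pass on the tail, then swap (1,0)
theorem pv_bpass_cons₂ (a b : Char × List Char × Char) (t : List (Char × List Char × Char)) :
    pvBpass (a :: b :: t) = pvSwapLN (a :: pvBpass (b :: t)) 1 := by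
  unfold pvBpass
  simp only [List.length_cons, Nat.add_sub_cancel]
  rw [List.range_succ, List.map_append, List.foldl_append,
    show (List.range t.length).map (fun k => t.length + 1 - k)
        = ((List.range t.length).map (fun k => t.length - k)).map Nat.succ by
      rw [List.map_map]; apply List.map_congr_left; intro k hk
      have := List.mem_range.mp hk
      simp only [Function.comp_apply]; omega,
    pv_foldl_swapLN_map_succ _ (by
      intro k hk
      obtain ⟨m, hm, rfl⟩ := List.mem_map.mp hk
      have := List.mem_range.mp hm; omega)]
  simp only [List.map_cons, List.map_nil, List.foldl_cons, List.foldl_nil,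
    Nat.add_sub_cancel_left]

-- second components are insensitive to the head's first letter
theorem pv_snd_getD (c b : Char × List Char × Char) (u : List (Char × List Char × Char))
    (j : Nat) (h : c.2 = b.2) : (((c :: u).getD j pvD).2) = (((b :: u).getD j pvD).2) := by
  cases j <;> simp [h]

-- characterization: the forward pass rotates the first components left by one
theorem pv_fpass_char (t : List (Char × List Char × Char)) (a : Char × List Char × Char) :
    pvFpass (a :: t) = (List.range (t.length + 1)).map (fun i =>
      (((a :: t).getD ((i + 1) % (t.length + 1)) pvD).1, ((a :: t).getD i pvD).2)) := by
  induction t generalizing a with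
  | nil => simp [pvFpass]
  | cons b u ih =>
    rw [pv_fpass_cons₂, ih]
    simp only [List.length_cons]
    apply List.ext_getElem
    · simp
    · intro i h1 h2
      simp only [List.length_cons, List.length_map, List.length_range] at h1 h2
      match i, h1, h2 with
      | 0, h1, h2 =>
        have m1 : (0 + 1) % (u.length + 1 + 1) = 1 := Nat.mod_eq_of_lt (by omega)
        simp [m1]
      | j + 1, h1, h2 =>
        rcases Nat.lt_or_ge j u.length with hj | hj
        · have m1 : (j + 1 + 1) % (u.length + 1 + 1) = j + 1 + 1 := Nat.mod_eq_of_lt (by omega)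
          have m2 : (j + 1) % (u.length + 1) = j + 1 := Nat.mod_eq_of_lt (by omega)
          simp only [List.getElem_cons_succ, List.getElem_map, List.getElem_range, m1, m2]
          rw [show (((a :: b :: u).getD (j + 1) pvD).2) = (((b :: u).getD j pvD).2) by simp]
          rw [show ((((a.1, b.2) :: u).getD j pvD).2) = (((b :: u).getD j pvD).2) from
            pv_snd_getD _ _ _ _ rfl]
          simp
        · have hj' : j = u.length := by omega
          subst hj'
          have m1 : (u.length + 1 + 1) % (u.length + 1 + 1) = 0 := Nat.mod_self _
          have m2 : (u.length + 1) % (u.length + 1) = 0 := Nat.mod_self _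
          simp only [List.getElem_cons_succ, List.getElem_map, List.getElem_range, m1, m2,
            List.getD_cons_succ]
          rw [pv_snd_getD (a.1, b.2) b u u.length rfl]
          simp

-- characterization: the backward pass rotates the third components right by one
theorem pv_bpass_char (t : List (Char × List Char × Char)) (a : Char × List Char × Char) :
    pvBpass (a :: t) = (List.range (t.length + 1)).map (fun i =>
      (((a :: t).getD i pvD).1, ((a :: t).getD i pvD).2.1,
       ((a :: t).getD ((i + t.length) % (t.length + 1)) pvD).2.2)) := by
  induction t generalizing a with
  | nil => simp [pvBpass]
  | cons b u ih =>
    rw [pv_bpass_cons₂, ih]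
    have m0 : (0 + u.length) % (u.length + 1) = u.length := by
      rw [Nat.zero_add]; exact Nat.mod_eq_of_lt (by omega)
    have hx : ((a :: (List.range (u.length + 1)).map (fun i =>
        (((b :: u).getD i pvD).1, ((b :: u).getD i pvD).2.1,
         ((b :: u).getD ((i + u.length) % (u.length + 1)) pvD).2.2))).getD 1 pvD)
        = (b.1, b.2.1, ((b :: u).getD u.length pvD).2.2) := by
      rw [List.getD_cons_succ, PySem.List.getD_map_range _ _ 0 _ (by omega), m0]
      simp
    rw [pvSwapLN]
    simp only [hx, List.getD_cons_zero, Nat.sub_self, List.set_cons_succ, List.set_cons_zero,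
      List.length_cons]
    apply List.ext_getElem
    · simp
    · intro i h1 h2
      simp only [List.length_cons, List.length_set, List.length_map, List.length_range] at h1 h2
      match i, h1, h2 with
      | 0, h1, h2 =>
        simp
        rfl
      | 1, h1, h2 =>
        have m1 : (1 + (u.length + 1)) % (u.length + 1 + 1) = 0 := by
          rw [show 1 + (u.length + 1) = u.length + 1 + 1 by omega, Nat.mod_self]
        simp [m1, List.getElem_set_self]
      | j + 2, h1, h2 =>
        have hj : j < u.length := by omega
        have m1 : (j + 1 + u.length) % (u.length + 1) = j := by
          rw [show j + 1 + u.length = u.length + 1 + j by omega, Nat.add_mod_left,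
            Nat.mod_eq_of_lt (by omega)]
        have m2 : (j + 2 + (u.length + 1)) % (u.length + 1 + 1) = j + 1 := by
          rw [show j + 2 + (u.length + 1) = u.length + 1 + 1 + (j + 1) by omega,
            Nat.add_mod_left, Nat.mod_eq_of_lt (by omega)]
        have hset : ∀ (L : List (Char × List Char × Char)) (v) (h : j + 1 < (L.set 0 v).length),
            (L.set 0 v)[j + 1] = L.getD (j + 1) pvD := by
          intro L v h
          rw [List.getElem_set_ne (by omega), List.getD_eq_getElem _ _ (by simpa using h)]
        rw [List.getElem_cons_succ, hset, PySem.List.getD_map_range _ _ _ _ (by omega), m1]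
        simp only [List.getElem_map, List.getElem_range, m2]
        simp

-- both passes together: firsts rotated left, lasts rotated right, middles fixed
theorem pv_passes_char_cons (a : Char × List Char × Char) (t : List (Char × List Char × Char)) :
    pvBpass (pvFpass (a :: t)) = (List.range (t.length + 1)).map (fun i =>
      (((a :: t).getD ((i + 1) % (t.length + 1)) pvD).1,
       ((a :: t).getD i pvD).2.1,
       ((a :: t).getD ((i + t.length) % (t.length + 1)) pvD).2.2)) := by
  rw [pv_fpass_char]
  conv_lhs => rw [List.range_succ_eq_map, List.map_cons, List.map_map]
  rw [pv_bpass_char]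
  simp only [List.length_map, List.length_range]
  have hL : ∀ (j : Nat), j < t.length + 1 →
      (((((a :: t).getD ((0 + 1) % (t.length + 1)) pvD).1, ((a :: t).getD 0 pvD).2) ::
        (List.range t.length).map ((fun i =>
          (((a :: t).getD ((i + 1) % (t.length + 1)) pvD).1, ((a :: t).getD i pvD).2)) ∘
            Nat.succ)).getD j pvD)
      = (((a :: t).getD ((j + 1) % (t.length + 1)) pvD).1, ((a :: t).getD j pvD).2) := by
    intro j hj
    match j, hj with
    | 0, hj => simp
    | m + 1, hj =>
      rw [List.getD_cons_succ, PySem.List.getD_map_range _ _ _ _ (by omega)]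
      rfl
  apply List.ext_getElem
  · simp
  · intro i h1 h2
    simp only [List.length_map, List.length_range] at h1 h2
    have hN : 0 < t.length + 1 := by omega
    simp only [List.getElem_map, List.getElem_range]
    rw [hL i (by omega), hL _ (Nat.mod_lt _ hN)]

theorem pv_passes_char (l : List (Char × List Char × Char)) (hl : l ≠ []) :
    pvBpass (pvFpass l) = (List.range l.length).map (fun i =>
      ((l.getD ((i + 1) % l.length) pvD).1,
       (l.getD i pvD).2.1,
       (l.getD ((i + (l.length - 1)) % l.length) pvD).2.2)) := by
  obtain ⟨a, t, rfl⟩ := List.exists_cons_of_ne_nil hl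
  rw [pv_passes_char_cons]
  simp only [List.length_cons, Nat.add_sub_cancel]

theorem cycle_letters_spec : Claim_equal_cycle_letters := by
  intro s _
  show cycle_letters s = cycle_letters_alt s
  simp only [cycle_letters, cycle_letters_alt]
  rw [pv_fwd_bridge, pv_bwd_bridge,
    PySem.List.foldl_append_singleton_eq_map, List.nil_append]
  cases hw : PySem.Chars.split₀ s.toList with
  | nil => simp [pvFpass, pvBpass, pvWordsToString]
  | cons w rest =>
    rw [pv_passes_char _ (by simp)]
    unfold pvWordsToString
    refine congrArg _ (congrArg _ ?_)
    simp only [List.length_map, List.length_cons, Nat.add_sub_cancel]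
    have hT : ∀ (j : Nat) (hj : j < rest.length + 1),
        (((w :: rest).map (fun w => (PySem.List.pyGetD w 0 ' ',
            PySem.List.slice w (some 1) (some (-1)),
            PySem.List.pyGetD w (-1) ' '))).getD j pvD)
        = (PySem.List.pyGetD ((w :: rest)[j]'(by simpa using hj)) 0 ' ',
           PySem.List.slice ((w :: rest)[j]'(by simpa using hj)) (some 1) (some (-1)),
           PySem.List.pyGetD ((w :: rest)[j]'(by simpa using hj)) (-1) ' ') := by
      intro j hj
      rw [List.getD_eq_getElem _ _ (by simpa using hj), List.getElem_map]
    apply List.ext_getElem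
    · simp
    · intro i h1 h2
      simp only [PySem.List.length_enumerate, List.length_cons, List.length_map,
        List.length_range] at h1 h2
      have hN : 0 < rest.length + 1 := by omega
      have hj1 : (i + 1) % (rest.length + 1) < rest.length + 1 := Nat.mod_lt _ hN
      have hj2 : (i + rest.length) % (rest.length + 1) < rest.length + 1 := Nat.mod_lt _ hN
      simp only [List.getElem_map, PySem.List.getElem_enumerate, List.getElem_range]
      rw [hT _ hj1, hT _ (by omega), hT _ hj2]
      simp only [pvGetFirstLetter, pvGetLastLetter, pvBuildWord, PySem.List.len_eq,
        List.length_cons]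
      rw [show (0 : Int) + (i : Int) + 1 = ((i + 1 : Nat) : Int) by push_cast; ring,
        show (0 : Int) + (i : Int) - 1 + ((rest.length + 1 : Nat) : Int)
            = ((i + rest.length : Nat) : Int) by push_cast; omega,
        PySem.Int.mod_natCast, PySem.Int.mod_natCast,
        PySem.List.pyGetD_natCast, PySem.List.pyGetD_natCast,
        List.getD_eq_getElem _ _ (by simpa using hj1),
        List.getD_eq_getElem _ _ (by simpa using hj2)]
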